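-- pv_equiv track=rewrite | github.com/yujy118/vcms-i18n | scripts/qa_check.py | check_newline
-- ===== SOURCE A (Python) =====
-- WARNING = 'WARNING'
--
-- def check_newline(ko, tr):
--     issues = []
--     for lang, data in tr.items():
--         for key in data:
--             if key not in ko: continue
--             ko_n = ko[key].count('\n')
--             tr_n = data[key].count('\n')
--             if abs(ko_n - tr_n) > 1:
--                 issues.append({'severity': WARNING, 'check': 'newline_mismatch',
--                     'key': key, 'lang': lang,
--                     'message': f'ko:{ko_n} vs {lang}:{tr_n}'})
--     return issues
-- ===== SOURCE B (Python) =====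
-- WARNING = 'WARNING'
--
-- def check_newline(ko, tr):
--     # per language, the issue chunk is computed by structural recursion over the
--     # key/text pairs (built back-to-front by prepending); chunks are concatenated
--     out = []
--     for lang, data in tr.items():
--         out += _keys(ko, lang, list(data.items()))
--     return out
--
-- def _keys(ko, lang, pairs):
--     if not pairs:
--         return []
--     key, text = pairs[0]
--     rest = _keys(ko, lang, pairs[1:])
--     base = ko.get(key)
--     if base is None:
--         return rest
--     ko_n = base.count('\n')
--     tr_n = text.count('\n')
--     if ko_n - tr_n > 1 or tr_n - ko_n > 1:
--         return [{'severity': WARNING, 'check': 'newline_mismatch', 'key': key,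
--                  'lang': lang, 'message': f'ko:{ko_n} vs {lang}:{tr_n}'}] + rest
--     return rest
-- ===== Notes on version B (the rewrite author's own statement) =====
-- stated objective: alternative
-- what changed: B replaces A's inner imperative loop (membership check, fresh ko[key]/data[key] lookups, abs test, append to a shared accumulator) by structural recursion over each language's key/text pairs that builds the issue chunk back-to-front by prepending, using a single .get/None lookup and a two-sided difference test; the outer loop just concatenates the per-language chunks; Pre_ only excludes association lists with duplicate keys, which are not encodings of any Python dict.
import Mathlib
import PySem

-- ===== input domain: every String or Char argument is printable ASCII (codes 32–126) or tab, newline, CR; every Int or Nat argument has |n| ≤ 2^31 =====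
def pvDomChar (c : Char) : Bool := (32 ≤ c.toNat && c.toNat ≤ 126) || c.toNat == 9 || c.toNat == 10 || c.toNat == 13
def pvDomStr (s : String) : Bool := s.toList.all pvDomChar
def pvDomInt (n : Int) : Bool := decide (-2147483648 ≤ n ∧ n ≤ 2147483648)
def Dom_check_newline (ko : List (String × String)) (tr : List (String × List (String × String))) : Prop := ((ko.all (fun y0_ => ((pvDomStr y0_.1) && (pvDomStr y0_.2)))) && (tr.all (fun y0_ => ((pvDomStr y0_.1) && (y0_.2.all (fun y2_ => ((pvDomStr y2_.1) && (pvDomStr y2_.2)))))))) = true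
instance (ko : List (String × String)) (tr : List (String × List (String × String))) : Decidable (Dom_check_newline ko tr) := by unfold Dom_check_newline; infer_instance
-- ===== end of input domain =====

-- B replaces A's inner imperative loop by structural recursion over each language's key/text
-- pairs (the chunk is built back-to-front by prepending), with the outer loop concatenating
-- the per-language chunks; same output, objective: alternative.

-- ===== PORT A =====
-- literal transliteration of A's nested loops; Python's d[key] cannot raise at either lookup
-- (ko[key] is guarded by the `key not in ko` check, data[key] takes key from data itself),
-- so both are ported as getD with an unreachable default.
def check_newline (ko : List (String × String)) (tr : List (String × List (String × String))) : List (List (String × String)) :=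
  tr.foldl (fun issues lp =>
    lp.2.foldl (fun issues q =>
      let key := q.1
      if (PySem.Dict.mk ko).contains key = false then issues
      else
        let ko_n : Int := (PySem.Str.count ((PySem.Dict.mk ko).getD key "") "\n" : Int)
        let tr_n : Int := (PySem.Str.count ((PySem.Dict.mk lp.2).getD key "") "\n" : Int)
        if 1 < |ko_n - tr_n| then
          issues ++ [[("severity", "WARNING"), ("check", "newline_mismatch"),
                      ("key", key), ("lang", lp.1),
                      ("message", "ko:" ++ PySem.Int.toStr ko_n ++ " vs " ++ lp.1 ++ ":" ++ PySem.Int.toStr tr_n)]]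
        else issues) issues) []

-- ===== PORT B =====
-- the warning record built by Source B's _keys
def pvWarn (key lang : String) (ko_n tr_n : Int) : List (String × String) :=
  [("severity", "WARNING"), ("check", "newline_mismatch"), ("key", key), ("lang", lang),
   ("message", "ko:" ++ PySem.Int.toStr ko_n ++ " vs " ++ lang ++ ":" ++ PySem.Int.toStr tr_n)]

-- Source B's _keys: structural recursion over one language's key/text pairs, prepending
def pvKeys (ko : PySem.Dict String String) (lang : String) : List (String × String) → List (List (String × String))
  | [] => []
  | q :: pairs =>
    let rest := pvKeys ko lang pairs
    match ko.get? q.1 with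
    | none => rest
    | some base =>
      let ko_n : Int := (PySem.Str.count base "\n" : Int)
      let tr_n : Int := (PySem.Str.count q.2 "\n" : Int)
      if 1 < ko_n - tr_n ∨ 1 < tr_n - ko_n then pvWarn q.1 lang ko_n tr_n :: rest else rest

-- literal transliteration of Source B's check_newline: loop over the languages, concatenating chunks
def check_newline_alt (ko : List (String × String)) (tr : List (String × List (String × String))) : List (List (String × String)) :=
  tr.foldl (fun out lp => out ++ pvKeys (PySem.Dict.mk ko) lp.1 lp.2) []

-- ===== PRECONDITION & SPEC =====
-- Pre_ excludes association lists carrying a duplicate key (in ko or inside some translation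
-- table): those are not encodings of any Python dict — every dict the Python code can receive
-- has distinct keys — and first-match vs last-wins order on them is accidental.
def Pre_check_newline (ko : List (String × String)) (tr : List (String × List (String × String))) : Prop :=
  (ko.map Prod.fst).Nodup ∧ ∀ p ∈ tr, (p.2.map Prod.fst).Nodup
instance (ko : List (String × String)) (tr : List (String × List (String × String))) : Decidable (Pre_check_newline ko tr) := by unfold Pre_check_newline; infer_instance

def pvWitness_check_newline : (List (String × String)) × (List (String × List (String × String))) :=
  ([("greet", "hi")], [("en", [("greet", "hi\n\nthere")])])

def Spec_check_newline (ko : List (String × String)) (tr : List (String × List (String × String))) (out : List (List (String × String))) : Prop := out = check_newline_alt ko tr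
instance (ko : List (String × String)) (tr : List (String × List (String × String))) (out : List (List (String × String))) : Decidable (Spec_check_newline ko tr out) := by unfold Spec_check_newline; infer_instance

-- ===== CLAIM (what is proved, stated in full; the proofs are below) =====
def Claim_equal_check_newline : Prop := ∀ (ko : List (String × String)) (tr : List (String × List (String × String))), Dom_check_newline ko tr → Pre_check_newline ko tr → Spec_check_newline ko tr (check_newline ko tr)

-- ===== LEMMAS AND PROOFS =====

-- the common middle form both ports are reduced to
def pvStep (ko : List (String × String)) (lang : String) (q : String × String) :
    Option (List (String × String)) :=
  match (PySem.Dict.mk ko).get? q.1 with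
  | none => none
  | some v =>
    let kn : Int := (PySem.Str.count v "\n" : Int)
    let tn : Int := (PySem.Str.count q.2 "\n" : Int)
    if 1 < |kn - tn| then some (pvWarn q.1 lang kn tn) else none

-- one step of A's inner loop, on a key drawn from data, appends exactly pvStep's output
theorem pv_stepA (ko data : List (String × String)) (lang : String)
    (q : String × String) (hq : q ∈ data) (hd : (data.map Prod.fst).Nodup)
    (acc : List (List (String × String))) :
    (if (PySem.Dict.mk ko).contains q.1 = false then acc
     else
       let ko_n : Int := (PySem.Str.count ((PySem.Dict.mk ko).getD q.1 "") "\n" : Int)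
       let tr_n : Int := (PySem.Str.count ((PySem.Dict.mk data).getD q.1 "") "\n" : Int)
       if 1 < |ko_n - tr_n| then
         acc ++ [[("severity", "WARNING"), ("check", "newline_mismatch"),
                  ("key", q.1), ("lang", lang),
                  ("message", "ko:" ++ PySem.Int.toStr ko_n ++ " vs " ++ lang ++ ":" ++ PySem.Int.toStr tr_n)]]
       else acc)
    = acc ++ (pvStep ko lang q).toList := by
  have hdata : (PySem.Dict.mk data).getD q.1 "" = q.2 :=
    PySem.Dict.getD_of_mem_items _ (by simpa [PySem.Dict.items] using hq)
      (by simpa [PySem.Dict.keys, PySem.Dict.items] using hd) ""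
  unfold pvStep
  rw [PySem.Dict.contains_eq_isSome_get?, hdata]
  cases hko : (PySem.Dict.mk ko).get? q.1 with
  | none => simp
  | some v =>
    have : (PySem.Dict.mk ko).getD q.1 "" = v := PySem.Dict.getD_of_get?_eq_some _ "" hko
    simp only [this, Option.isSome_some]
    rw [if_neg (by simp)]
    split <;> simp [pvWarn]

-- A's inner loop over data equals filterMap pvStep appended to the accumulator
theorem pv_inner (ko data : List (String × String)) (lang : String)
    (hd : (data.map Prod.fst).Nodup) :
    ∀ (l : List (String × String)), (∀ q ∈ l, q ∈ data) →
    ∀ (acc : List (List (String × String))),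
    l.foldl (fun issues q =>
      let key := q.1
      if (PySem.Dict.mk ko).contains key = false then issues
      else
        let ko_n : Int := (PySem.Str.count ((PySem.Dict.mk ko).getD key "") "\n" : Int)
        let tr_n : Int := (PySem.Str.count ((PySem.Dict.mk data).getD key "") "\n" : Int)
        if 1 < |ko_n - tr_n| then
          issues ++ [[("severity", "WARNING"), ("check", "newline_mismatch"),
                      ("key", key), ("lang", lang),
                      ("message", "ko:" ++ PySem.Int.toStr ko_n ++ " vs " ++ lang ++ ":" ++ PySem.Int.toStr tr_n)]]
        else issues) acc
    = acc ++ l.filterMap (pvStep ko lang) := by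
  intro l
  induction l with
  | nil => intro _ acc; simp
  | cons q rest ih =>
    intro hsub acc
    have hq : q ∈ data := hsub q (List.mem_cons_self ..)
    simp only [List.foldl_cons]
    rw [ih (fun x hx => hsub x (List.mem_cons_of_mem _ hx)),
        pv_stepA ko data lang q hq hd acc]
    cases h : pvStep ko lang q with
    | none => simp [h]
    | some w => simp [h]

-- B's per-language recursion computes the same filterMap
theorem pv_keys_eq (ko : List (String × String)) (lang : String)
    (l : List (String × String)) :
    pvKeys (PySem.Dict.mk ko) lang l = l.filterMap (pvStep ko lang) := by
  induction l with
  | nil => rfl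
  | cons q rest ih =>
    simp only [pvKeys, ih, List.filterMap_cons]
    unfold pvStep
    cases (PySem.Dict.mk ko).get? q.1 with
    | none => rfl
    | some v =>
      simp only []
      have habs : (1 < (PySem.Str.count v "\n" : Int) - (PySem.Str.count q.2 "\n" : Int) ∨
          1 < (PySem.Str.count q.2 "\n" : Int) - (PySem.Str.count v "\n" : Int)) ↔
          1 < |(PySem.Str.count v "\n" : Int) - (PySem.Str.count q.2 "\n" : Int)| := by
        rw [lt_abs]; omega
      rw [if_congr habs rfl rfl]
      split <;> simp

-- ===== VERDICT (by name: the statement is the Claim_ definition above) =====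
theorem check_newline_spec : Claim_equal_check_newline := by
  intro ko tr _ hpre
  unfold Spec_check_newline check_newline check_newline_alt
  rw [PySem.List.foldl_congr_mem' tr _
        (fun acc lp => acc ++ lp.2.filterMap (pvStep ko lp.1)) []
        (fun lp hlp acc => pv_inner ko lp.2 lp.1 (hpre.2 lp hlp) lp.2 (fun _ h => h) acc),
      PySem.List.foldl_append_eq_flatMap, PySem.List.foldl_append_eq_flatMap]
  simp only [List.nil_append]
  exact List.flatMap_congr (fun lp _ => (pv_keys_eq ko lp.1 lp.2).symm)
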